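-- pv_equiv track=rewrite | github.com/gschen/where2go-python-test | 1906101007李和龙/ago/求圆周率（2）.py | kk
-- ===== SOURCE A (Python) =====
-- def kk(n):
--     if n == 0:
--         return 1
--     if n == 1:
--         return 3
--     if n > 1:
--         k = 2 * n + 1
--         return k * kk(n - 1)
-- ===== SOURCE B (Python) =====
-- def kk(n):
--     result = 1
--     for i in range(1, n + 1):
--         result *= 2 * i + 1
--     return result
-- ===== Notes on version B (the rewrite author's own statement) =====
-- stated objective: simpler
-- what changed: Replaces the three-branch recursion with a single iterative product loop over range(1, n+1).
-- outside the precondition, e.g. on kk(-1): A returns None, B returns 1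
import Mathlib
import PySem

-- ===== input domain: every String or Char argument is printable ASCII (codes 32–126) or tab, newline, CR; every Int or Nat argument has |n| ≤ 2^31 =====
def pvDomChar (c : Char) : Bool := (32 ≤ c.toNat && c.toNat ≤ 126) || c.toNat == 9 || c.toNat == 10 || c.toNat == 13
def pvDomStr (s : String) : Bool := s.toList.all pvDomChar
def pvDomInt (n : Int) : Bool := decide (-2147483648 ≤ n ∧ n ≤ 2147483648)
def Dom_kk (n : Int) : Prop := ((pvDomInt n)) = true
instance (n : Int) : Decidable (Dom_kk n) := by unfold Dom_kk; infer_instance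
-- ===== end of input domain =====

-- B replaces the recursion by an iterative product loop; equivalence claimed for n ≥ 0.
-- ===== PORT A =====
def kk (n : Int) : Int :=
  if n = 0 then 1
  else if n = 1 then 3
  else if 1 < n then (2 * n + 1) * kk (n - 1)
  else 0  -- Python falls through and returns None here; excluded by Pre_kk
termination_by n.toNat
decreasing_by omega

-- ===== PORT B =====
def kk_alt (n : Int) : Int :=
  (PySem.List.pyRange 1 (n + 1) 1).foldl (fun result i => result * (2 * i + 1)) 1

-- ===== PRECONDITION & SPEC =====
-- Pre_ excludes negative n, where A's if-chain falls through and returns None (not an int; B returns 1 there),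
-- and large n, where A's deep recursion can exceed the interpreter's recursion limit and raise RecursionError.
def Pre_kk (n : Int) : Prop := 0 ≤ n ∧ n ≤ 999
instance (n : Int) : Decidable (Pre_kk n) := by unfold Pre_kk; infer_instance
def pvWitness_kk : Int := 3
def Spec_kk (n : Int) (out : Int) : Prop := out = kk_alt n
instance (n : Int) (out : Int) : Decidable (Spec_kk n out) := by unfold Spec_kk; infer_instance

-- ===== CLAIM (what is proved, stated in full; the proofs are below) =====
def Claim_equal_kk : Prop := ∀ (n : Int), Dom_kk n → Pre_kk n → Spec_kk n (kk n)

-- ===== LEMMAS AND PROOFS =====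
theorem kk_alt_succ (n : Int) (h : 0 ≤ n) : kk_alt (n + 1) = kk_alt n * (2 * (n + 1) + 1) := by
  unfold kk_alt
  rw [show n + 1 + 1 = (n + 1) + 1 from rfl, PySem.List.pyRange_one_succ_right (by omega), List.foldl_append]
  simp

theorem kk_eq_alt (k : Nat) : ∀ n : Int, n.toNat = k → 0 ≤ n → kk n = kk_alt n := by
  induction k with
  | zero =>
    intro n hk h
    have : n = 0 := by omega
    subst this
    rw [kk]
    unfold kk_alt
    rw [PySem.List.pyRange_one_eq_nil (by omega)]
    simp
  | succ m ih =>
    intro n hk h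
    have hn : n = (m : Int) + 1 := by omega
    subst hn
    rw [kk_alt_succ _ (by omega)]
    rw [kk]
    by_cases h0 : (m : Int) + 1 = 0
    · omega
    · rw [if_neg h0]
      by_cases h1 : (m : Int) + 1 = 1
      · have hm : m = 0 := by omega
        subst hm
        rw [if_pos h1]
        unfold kk_alt
        rw [PySem.List.pyRange_one_eq_nil (by omega)]
        norm_num
      · rw [if_neg h1, if_pos (by omega)]
        have heq : (m : Int) + 1 - 1 = (m : Int) := by ring
        rw [heq, ih (m : Int) (by omega) (by omega)]
        ring

-- ===== VERDICT (by name: the statement is the Claim_ definition above) =====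
theorem kk_spec : Claim_equal_kk := by
  intro n _ hpre
  exact kk_eq_alt n.toNat n rfl hpre.1
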